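-- pv_equiv track=rewrite | github.com/CMC-EPI-LOG/EPI-LOG-AI | app/services.py | _normalize_cache_token
-- ===== SOURCE A (Python) =====
-- from typing import List, Dict, Optional, Any
--
-- def _normalize_cache_token(value: Any) -> str:
--     if value is None:
--         return "na"
--     token = str(value).strip()
--     if not token:
--         return "na"
--     for old, new in [
--         (" ", ""),
--         (":", "-"),
--         ("/", "-"),
--         ("\\", "-"),
--         ("\n", ""),
--         ("\t", "")
--     ]:
--         token = token.replace(old, new)
--     return token or "na"
-- ===== SOURCE B (Python) =====
-- _TOKEN_MAP = {" ": "", ":": "-", "/": "-", "\\": "-", "\n": "", "\t": ""}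
--
--
-- def _normalize_cache_token(value):
--     if value is None:
--         return "na"
--     token = str(value).strip()
--     if not token:
--         return "na"
--     pieces = []
--     for ch in token:
--         pieces.append(_TOKEN_MAP.get(ch, ch))
--     result = "".join(pieces)
--     return result or "na"
-- ===== Notes on version B (the rewrite author's own statement) =====
-- stated objective: alternative
-- what changed: Replaces the six sequential full-string replace passes with one character-to-replacement mapping consulted in a single pass over the token, joining the mapped pieces.
import Mathlib
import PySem

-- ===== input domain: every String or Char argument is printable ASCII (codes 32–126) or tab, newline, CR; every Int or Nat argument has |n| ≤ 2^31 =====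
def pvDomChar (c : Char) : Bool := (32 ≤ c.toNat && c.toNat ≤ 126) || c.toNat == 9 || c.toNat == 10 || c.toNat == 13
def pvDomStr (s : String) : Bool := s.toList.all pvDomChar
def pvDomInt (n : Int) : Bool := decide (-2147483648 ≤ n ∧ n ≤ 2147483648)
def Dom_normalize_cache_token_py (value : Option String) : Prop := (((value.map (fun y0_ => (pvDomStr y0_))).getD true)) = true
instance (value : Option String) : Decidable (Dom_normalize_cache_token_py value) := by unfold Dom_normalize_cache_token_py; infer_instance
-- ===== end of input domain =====

-- B replaces A's six sequential replace passes by one mapping consulted in a single pass over the token.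

-- ===== PORT A =====
def normalize_cache_token_py (value : Option String) : String :=
  match value with
  | none => "na"
  | some v =>
    let token := PySem.Str.strip v
    if token = "" then "na"
    else
      let token := [(" ", ""), (":", "-"), ("/", "-"), ("\\", "-"), ("\n", ""), ("\t", "")].foldl
        (fun t (p : String × String) => PySem.Str.replace t p.1 p.2) token
      if token = "" then "na" else token

-- ===== PORT B =====
def pvTokenMap : PySem.Dict Char String :=
  PySem.Dict.ofList [(' ', ""), (':', "-"), ('/', "-"), ('\\', "-"), ('\n', ""), ('\t', "")]

def normalize_cache_token_py_alt (value : Option String) : String :=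
  match value with
  | none => "na"
  | some v =>
    let token := PySem.Str.strip v
    if token = "" then "na"
    else
      let pieces := token.toList.map (fun ch => pvTokenMap.getD ch (String.ofList [ch]))
      let result := PySem.Str.join "" pieces
      if result = "" then "na" else result

-- ===== PRECONDITION & SPEC =====
def Spec_normalize_cache_token_py (value : Option String) (out : String) : Prop := out = normalize_cache_token_py_alt value
instance (value : Option String) (out : String) : Decidable (Spec_normalize_cache_token_py value out) := by unfold Spec_normalize_cache_token_py; infer_instance

-- ===== CLAIM (what is proved, stated in full; the proofs are below) =====
def Claim_equal_normalize_cache_token_py : Prop := ∀ (value : Option String), Dom_normalize_cache_token_py value → Spec_normalize_cache_token_py value (normalize_cache_token_py value)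

-- ===== LEMMAS AND PROOFS =====

-- step function B applies to each char (at the List Char level)
def pvStep (c : Char) : List Char := (pvTokenMap.getD c (String.ofList [c])).toList

theorem replace_go_single (c : Char) (new : List Char) :
    ∀ (s : List Char) (fuel : Nat) (acc : List Char), s.length ≤ fuel →
      PySem.Chars.replace.go [c] new fuel s acc =
        acc.reverse ++ s.flatMap (fun x => if x = c then new else [x]) := by
  intro s
  induction s with
  | nil =>
    intro fuel acc _
    cases fuel <;> simp [PySem.Chars.replace.go]
  | cons x t ih =>
    intro fuel acc h
    cases fuel with
    | zero => simp at h
    | succ n =>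
      by_cases hx : x = c
      · subst hx
        have : List.isPrefixOf [x] (x :: t) = true := by simp [List.isPrefixOf]
        simp only [PySem.Chars.replace.go, this, if_pos]
        rw [show List.drop [x].length (x :: t) = t from rfl,
            ih n (new.reverse ++ acc) (by simpa using Nat.lt_succ_iff.mp (Nat.lt_of_lt_of_le (by simp) h))]
        simp
      · have hpre : List.isPrefixOf [c] (x :: t) = false := by
          simp [List.isPrefixOf]
          intro h'; exact absurd h'.symm hx
        simp only [PySem.Chars.replace.go, hpre, if_neg, Bool.false_eq_true, not_false_iff]
        rw [ih n (x :: acc) (Nat.lt_succ_iff.mp (by simpa using h))]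
        simp [hx]

theorem replace_single (c : Char) (new s : List Char) :
    PySem.Chars.replace s [c] new = s.flatMap (fun x => if x = c then new else [x]) := by
  unfold PySem.Chars.replace
  simp only [List.isEmpty_cons, Bool.false_eq_true, if_false]
  exact replace_go_single c new s s.length [] (le_refl _)

theorem pvStep_eq (c : Char) : pvStep c =
    if c = ' ' then [] else if c = ':' then ['-'] else if c = '/' then ['-']
    else if c = '\\' then ['-'] else if c = '\n' then [] else if c = '\t' then [] else [c] := by
  by_cases h1 : c = ' '
  · subst h1; decide
  by_cases h2 : c = ':'
  · subst h2; decide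
  by_cases h3 : c = '/'
  · subst h3; decide
  by_cases h4 : c = '\\'
  · subst h4; decide
  by_cases h5 : c = '\n'
  · subst h5; decide
  by_cases h6 : c = '\t'
  · subst h6; decide
  have hm : pvTokenMap.items = [(' ', ""), (':', "-"), ('/', "-"), ('\\', "-"), ('\n', ""), ('\t', "")] := by decide
  have e1 : (' ' == c) = false := by simp [Ne.symm h1]
  have e2 : ((':' : Char) == c) = false := by simp [Ne.symm h2]
  have e3 : (('/' : Char) == c) = false := by simp [Ne.symm h3]
  have e4 : (('\\' : Char) == c) = false := by simp [Ne.symm h4]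
  have e5 : (('\n' : Char) == c) = false := by simp [Ne.symm h5]
  have e6 : (('\t' : Char) == c) = false := by simp [Ne.symm h6]
  simp [pvStep, PySem.Dict.getD, PySem.Dict.get?, hm, List.find?, e1, e2, e3, e4, e5, e6,
    h1, h2, h3, h4, h5, h6]

theorem chain_chars (cs : List Char) :
    PySem.Chars.replace (PySem.Chars.replace (PySem.Chars.replace (PySem.Chars.replace
      (PySem.Chars.replace (PySem.Chars.replace cs [' '] []) [':'] ['-']) ['/'] ['-'])
      ['\\'] ['-']) ['\n'] []) ['\t'] [] = cs.flatMap pvStep := by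
  simp only [replace_single, List.flatMap_assoc]
  congr 1
  funext c
  rw [pvStep_eq]
  by_cases h1 : c = ' '
  · subst h1; decide
  by_cases h2 : c = ':'
  · subst h2; decide
  by_cases h3 : c = '/'
  · subst h3; decide
  by_cases h4 : c = '\\'
  · subst h4; decide
  by_cases h5 : c = '\n'
  · subst h5; decide
  by_cases h6 : c = '\t'
  · subst h6; decide
  simp [h1, h2, h3, h4, h5, h6]

theorem string_eq_of_toList {a b : String} (h : a.toList = b.toList) : a = b := by
  have := congrArg String.ofList h
  simpa [String.ofList_toList] using this

theorem join_empty_flatten : ∀ (l : List (List Char)), PySem.Chars.join [] l = l.flatten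
  | [] => by simp [PySem.Chars.join, List.intercalate]
  | [a] => by simp [PySem.Chars.join, List.intercalate]
  | a :: b :: t => by
    rw [PySem.Chars.join_cons_cons, join_empty_flatten (b :: t)]
    simp

theorem normalize_cache_token_py_spec : Claim_equal_normalize_cache_token_py := by
  intro value _
  unfold Spec_normalize_cache_token_py normalize_cache_token_py normalize_cache_token_py_alt
  cases value with
  | none => rfl
  | some v =>
    simp only []
    by_cases h : PySem.Str.strip v = ""
    · simp [h]
    · simp only [h, if_false]
      have key : ([(" ", ""), (":", "-"), ("/", "-"), ("\\", "-"), ("\n", ""), ("\t", "")].foldl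
            (fun t (p : String × String) => PySem.Str.replace t p.1 p.2) (PySem.Str.strip v)) =
          PySem.Str.join "" ((PySem.Str.strip v).toList.map (fun ch => pvTokenMap.getD ch (String.ofList [ch]))) := by
        apply string_eq_of_toList
        simp only [List.foldl_cons, List.foldl_nil, PySem.Str.toList_replace, PySem.Str.toList_join]
        rw [show (" " : String).toList = [' '] from rfl, show ("" : String).toList = [] from rfl,
            show (":" : String).toList = [':'] from rfl, show ("-" : String).toList = ['-'] from rfl,
            show ("/" : String).toList = ['/'] from rfl, show ("\\" : String).toList = ['\\'] from rfl,
            show ("\n" : String).toList = ['\n'] from rfl, show ("\t" : String).toList = ['\t'] from rfl,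
            chain_chars, join_empty_flatten]
        rw [List.map_map, List.flatMap_def]
        rfl
      rw [key]
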